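-- pv_equiv track=rewrite | github.com/deveucatur/ninebox-streamlit | util.py | listaCompNon0
-- ===== SOURCE A (Python) =====
-- def listaCompNon0(data, categories):
--     lisaux = []
--     for i in range(len(data)):
--         aux = []
--         for j in range(len(data[i])):
--             aux.append([data[i][j], categories[j]])
--         lisaux.append(aux)
--     lisaux1 = []
--     for i in range(len(lisaux[0])):
--         aux = []
--         aux1 = []
--         for j in range(len(lisaux)):
--             aux1.append(lisaux[j][i][0])
--             aux.append(lisaux[j][i])
--
--         if aux1.count(0) < len(aux1):
--             lisaux1.append(aux)
--     return [[lisaux1[x][y][0] for x in range(len(lisaux1))] for y in range(len(lisaux1[0]))], \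
--            [[lisaux1[x][y][1] for x in range(len(lisaux1))] for y in range(1)][0]
-- ===== SOURCE B (Python) =====
-- def listaCompNon0(data, categories):
--     kept = [j for j in range(len(data[0])) if any(row[j] != 0 for row in data)]
--     return [[row[j] for j in kept] for row in data], [categories[j] for j in kept]
-- ===== Notes on version B (the rewrite author's own statement) =====
-- stated objective: simpler
-- what changed: Replaces A's build-labeled-matrix / transpose / filter / double-transpose-back pipeline by computing the kept column indices once and emitting each output row and the category list directly by comprehension over those indices.
import Mathlib
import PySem

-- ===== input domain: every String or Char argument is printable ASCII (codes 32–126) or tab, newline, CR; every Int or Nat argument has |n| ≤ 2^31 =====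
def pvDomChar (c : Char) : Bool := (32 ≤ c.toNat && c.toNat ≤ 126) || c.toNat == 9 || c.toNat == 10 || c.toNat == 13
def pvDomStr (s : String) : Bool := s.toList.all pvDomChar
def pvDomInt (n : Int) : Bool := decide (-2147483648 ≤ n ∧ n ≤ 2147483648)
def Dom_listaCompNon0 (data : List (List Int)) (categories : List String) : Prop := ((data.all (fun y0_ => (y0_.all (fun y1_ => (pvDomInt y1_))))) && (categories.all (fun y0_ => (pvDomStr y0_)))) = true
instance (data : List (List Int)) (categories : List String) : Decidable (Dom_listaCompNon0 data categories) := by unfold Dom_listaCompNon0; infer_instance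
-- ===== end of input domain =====

-- B drops A's value/category pairing and double transpose: it computes the kept column
-- indices once and emits both outputs by direct comprehension (objective: simpler).

-- ===== PORT A =====
def listaCompNon0 (data : List (List Int)) (categories : List String) : List (List Int) × List String :=
  let lisaux : List (List (Int × String)) :=
    (PySem.List.pyRange 0 data.length 1).foldl (fun lisaux i =>
      let row := PySem.List.pyGetD data i []
      let aux := (PySem.List.pyRange 0 row.length 1).foldl (fun aux j =>
        aux ++ [(PySem.List.pyGetD row j 0, PySem.List.pyGetD categories j "")]) []
      lisaux ++ [aux]) []
  let lisaux1 : List (List (Int × String)) :=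
    (PySem.List.pyRange 0 (PySem.List.pyGetD lisaux 0 []).length 1).foldl (fun lisaux1 i =>
      let p := (PySem.List.pyRange 0 lisaux.length 1).foldl
        (fun (p : List (Int × String) × List Int) j =>
          (p.1 ++ [PySem.List.pyGetD (PySem.List.pyGetD lisaux j []) i (0, "")],
           p.2 ++ [(PySem.List.pyGetD (PySem.List.pyGetD lisaux j []) i (0, "")).1])) ([], [])
      if PySem.List.count p.2 0 < p.2.length then lisaux1 ++ [p.1] else lisaux1) []
  ((PySem.List.pyRange 0 (PySem.List.pyGetD lisaux1 0 []).length 1).map (fun y =>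
      (PySem.List.pyRange 0 lisaux1.length 1).map (fun x =>
        (PySem.List.pyGetD (PySem.List.pyGetD lisaux1 x []) y (0, "")).1)),
   PySem.List.pyGetD ((PySem.List.pyRange 0 1 1).map (fun y =>
      (PySem.List.pyRange 0 lisaux1.length 1).map (fun x =>
        (PySem.List.pyGetD (PySem.List.pyGetD lisaux1 x []) y (0, "")).2))) 0 [])

-- ===== PORT B =====
def listaCompNon0_alt (data : List (List Int)) (categories : List String) : List (List Int) × List String :=
  let kept := (PySem.List.pyRange 0 (PySem.List.pyGetD data 0 []).length 1).filter
      (fun j => data.any (fun row => PySem.List.pyGetD row j 0 != 0))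
  (data.map (fun row => kept.map (fun j => PySem.List.pyGetD row j 0)),
   kept.map (fun j => PySem.List.pyGetD categories j ""))

-- ===== PRECONDITION & SPEC =====
-- Pre_ is exactly the set of inputs on which A returns: A raises IndexError when data is
-- empty, when some row is shorter than the first row or longer than categories, or when
-- the first len(data[0]) columns are all zero (lisaux1[0] on an empty lisaux1).
def Pre_listaCompNon0 (data : List (List Int)) (categories : List String) : Prop :=
  data ≠ [] ∧
  (∀ row ∈ data, (data.headD []).length ≤ row.length ∧ row.length ≤ categories.length) ∧
  (∃ row ∈ data, ∃ v ∈ row.take (data.headD []).length, v ≠ 0)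
instance (data : List (List Int)) (categories : List String) : Decidable (Pre_listaCompNon0 data categories) := by unfold Pre_listaCompNon0; infer_instance

def pvWitness_listaCompNon0 : List (List Int) × List String := ([[1, 0], [0, 0]], ["a", "b"])

def Spec_listaCompNon0 (data : List (List Int)) (categories : List String) (out : List (List Int) × List String) : Prop := out = listaCompNon0_alt data categories
instance (data : List (List Int)) (categories : List String) (out : List (List Int) × List String) : Decidable (Spec_listaCompNon0 data categories out) := by unfold Spec_listaCompNon0; infer_instance

-- ===== CLAIM (what is proved, stated in full; the proofs are below) =====
def Claim_equal_listaCompNon0 : Prop := ∀ (data : List (List Int)) (categories : List String), Dom_listaCompNon0 data categories → Pre_listaCompNon0 data categories → Spec_listaCompNon0 data categories (listaCompNon0 data categories)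

-- ===== LEMMAS AND PROOFS =====
def rowA (cats : List String) (row : List Int) : List (Int × String) :=
  (PySem.List.pyRange 0 (row.length : Int)).map
    (fun j => (PySem.List.pyGetD row j 0, PySem.List.pyGetD cats j ""))

theorem map_get_comp {α β : Type} (xs : List α) (d : α) (f : α → β) :
    (PySem.List.pyRange 0 (xs.length : Int)).map (fun j => f (PySem.List.pyGetD xs j d)) = xs.map f := by
  conv_rhs => rw [← PySem.List.map_pyGetD_pyRange_zero' xs d]
  rw [List.map_map]
  rfl

theorem pyGetD_map_in {α β : Type} (f : α → β) (xs : List α) (y : Int) (d : β) (d' : α)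
    (h0 : 0 ≤ y) (h1 : y < (xs.length : Int)) :
    PySem.List.pyGetD (xs.map f) y d = f (PySem.List.pyGetD xs y d') := by
  rw [PySem.List.pyGetD_eq_getElem _ d h0 (by simpa using h1),
      PySem.List.pyGetD_eq_getElem _ d' h0 h1, List.getElem_map]

theorem count_lt_any (xs : List Int) :
    decide (PySem.List.count xs 0 < xs.length) = xs.any (fun x => x != 0) := by
  cases hA : xs.any (fun x => x != 0) with
  | false =>
    simp only [List.any_eq_false, bne_iff_ne, ne_eq, not_not] at hA
    have h : List.count 0 xs = xs.length := List.count_eq_length.mpr (fun b hb => (hA b hb).symm)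
    simp [PySem.List.count_eq, h]
  | true =>
    simp only [List.any_eq_true, bne_iff_ne, ne_eq] at hA
    obtain ⟨x, hx, hxne⟩ := hA
    have hne : List.count 0 xs ≠ xs.length := by
      intro h
      exact hxne ((List.count_eq_length.mp h x hx).symm)
    have hle : List.count 0 xs ≤ xs.length := List.count_le_length
    have hlt : List.count 0 xs < xs.length := by omega
    simp [PySem.List.count_eq, hlt]

theorem main_eq (d0 : List Int) (rest : List (List Int)) (cats : List String)
    (hlen : ∀ row ∈ d0 :: rest, d0.length ≤ row.length ∧ row.length ≤ cats.length)
    (hnz : ∃ row ∈ d0 :: rest, ∃ v ∈ row.take d0.length, v ≠ 0) :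
    listaCompNon0 (d0 :: rest) cats = listaCompNon0_alt (d0 :: rest) cats := by
  simp only [listaCompNon0, listaCompNon0_alt]
  have hlis : (PySem.List.pyRange 0 ((d0 :: rest).length : Int)).foldl
      (fun lisaux i =>
        lisaux ++ [(PySem.List.pyRange 0 ((PySem.List.pyGetD (d0 :: rest) i []).length : Int)).foldl
          (fun aux j => aux ++ [(PySem.List.pyGetD (PySem.List.pyGetD (d0 :: rest) i []) j 0,
                                 PySem.List.pyGetD cats j "")]) []]) []
      = (d0 :: rest).map (rowA cats) := by
    rw [PySem.List.foldl_pyRange_zero_pyGetD' (d0 :: rest) []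
        (fun acc row => acc ++ [(PySem.List.pyRange 0 (row.length : Int)).foldl
          (fun aux j => aux ++ [(PySem.List.pyGetD row j 0, PySem.List.pyGetD cats j "")]) []])]
    simp only [PySem.List.foldl_append_singleton_eq_map, List.nil_append]
    rfl
  rw [hlis]
  set L := List.map (rowA cats) (d0 :: rest) with hL
  have hinner : ∀ i : Int,
      (PySem.List.pyRange 0 (L.length : Int)).foldl
        (fun (p : List (Int × String) × List Int) j =>
          (p.1 ++ [PySem.List.pyGetD (PySem.List.pyGetD L j []) i (0, "")],
           p.2 ++ [(PySem.List.pyGetD (PySem.List.pyGetD L j []) i (0, "")).1])) ([], [])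
      = (L.map (fun r => PySem.List.pyGetD r i (0, "")),
         L.map (fun r => (PySem.List.pyGetD r i (0, "")).1)) := by
    intro i
    rw [PySem.List.foldl_prod_mk
        (f := fun s j => s ++ [PySem.List.pyGetD (PySem.List.pyGetD L j []) i (0, "")])
        (g := fun s j => s ++ [(PySem.List.pyGetD (PySem.List.pyGetD L j []) i (0, "")).1])]
    rw [PySem.List.foldl_pyRange_zero_pyGetD' L []
        (fun acc r => acc ++ [PySem.List.pyGetD r i (0, "")]),
        PySem.List.foldl_pyRange_zero_pyGetD' L []
        (fun acc r => acc ++ [(PySem.List.pyGetD r i (0, "")).1])]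
    simp only [PySem.List.foldl_append_singleton_eq_map, List.nil_append]
  have hcolc : ∀ i : Int, 0 ≤ i → i < (d0.length : Int) →
      L.map (fun r => PySem.List.pyGetD r i (0, ""))
        = (d0 :: rest).map (fun row => (PySem.List.pyGetD row i 0, PySem.List.pyGetD cats i "")) := by
    intro i h0 hi
    rw [hL, List.map_map]
    refine List.map_congr_left ?_
    intro row hrow
    have hrl : i < (row.length : Int) := lt_of_lt_of_le hi (by exact_mod_cast (hlen row hrow).1)
    show PySem.List.pyGetD (rowA cats row) i (0, "") = _
    unfold rowA
    rw [PySem.List.pyGetD_map_pyRange_of_nonneg _ _ _ _ h0 hrl]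
  have hcolv : ∀ i : Int, 0 ≤ i → i < (d0.length : Int) →
      L.map (fun r => (PySem.List.pyGetD r i (0, "")).1)
        = (d0 :: rest).map (fun row => PySem.List.pyGetD row i 0) := by
    intro i h0 hi
    have h := congrArg (List.map Prod.fst) (hcolc i h0 hi)
    simpa [List.map_map, Function.comp] using h
  have hn0 : PySem.List.pyGetD L 0 [] = rowA cats d0 := by
    rw [hL]; simp [List.map_cons, PySem.List.pyGetD_zero_cons]
  have hnlen : (rowA cats d0).length = d0.length := by
    simp [rowA, PySem.List.length_pyRange_one]
  simp only [hinner, hn0, hnlen]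
  have hbody : (PySem.List.pyRange 0 (d0.length : Int)).foldl
      (fun lisaux1 i =>
        if PySem.List.count (L.map (fun r => (PySem.List.pyGetD r i (0, "")).1)) 0 <
            (L.map (fun r => (PySem.List.pyGetD r i (0, "")).1)).length then
          lisaux1 ++ [L.map (fun r => PySem.List.pyGetD r i (0, ""))]
        else lisaux1) []
      = (PySem.List.pyRange 0 (d0.length : Int)).foldl
      (fun lisaux1 i =>
        if PySem.List.count ((d0 :: rest).map (fun row => PySem.List.pyGetD row i 0)) 0 <
            ((d0 :: rest).map (fun row => PySem.List.pyGetD row i 0)).length then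
          lisaux1 ++ [(d0 :: rest).map (fun row => (PySem.List.pyGetD row i 0, PySem.List.pyGetD cats i ""))]
        else lisaux1) [] := by
    refine PySem.List.foldl_congr_mem _ _ _ _ ?_
    intro acc i hi
    obtain ⟨h0, hilt⟩ := PySem.List.mem_pyRange_one.mp hi
    rw [hcolc i h0 hilt, hcolv i h0 hilt]
  rw [hbody,
      PySem.List.foldl_append_ite
        (p := fun i : Int => PySem.List.count ((d0 :: rest).map (fun row => PySem.List.pyGetD row i 0)) 0 <
            ((d0 :: rest).map (fun row => PySem.List.pyGetD row i 0)).length)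
        (f := fun i : Int => (d0 :: rest).map (fun row => (PySem.List.pyGetD row i 0, PySem.List.pyGetD cats i "")))]
  simp only [List.nil_append]
  have hpred : (PySem.List.pyRange 0 (d0.length : Int)).filter
        (fun i => decide (PySem.List.count ((d0 :: rest).map (fun row => PySem.List.pyGetD row i 0)) 0 <
            ((d0 :: rest).map (fun row => PySem.List.pyGetD row i 0)).length))
      = (PySem.List.pyRange 0 (d0.length : Int)).filter
        (fun j => (d0 :: rest).any (fun row => PySem.List.pyGetD row j 0 != 0)) := by
    refine List.filter_congr ?_
    intro i _
    rw [count_lt_any]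
    simp [List.any_map, Function.comp_def]
  simp only [PySem.List.pyGetD_zero_cons]
  rw [hpred]
  have hkne : (PySem.List.pyRange 0 (d0.length : Int)).filter
      (fun j => (d0 :: rest).any (fun row => PySem.List.pyGetD row j 0 != 0)) ≠ [] := by
    obtain ⟨row, hrow, v, hv, hvne⟩ := hnz
    obtain ⟨k, hk, he⟩ := List.getElem_of_mem hv
    have hkb : k < d0.length ∧ k < row.length := by
      simp [List.length_take] at hk
      exact hk
    have he' : row[k]'hkb.2 = v := by
      rw [← he]
      simp [List.getElem_take]
    intro hemp
    have hmem : (k : Int) ∈ (PySem.List.pyRange 0 (d0.length : Int)).filter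
        (fun j => (d0 :: rest).any (fun row => PySem.List.pyGetD row j 0 != 0)) := by
      refine List.mem_filter.mpr ⟨PySem.List.mem_pyRange_one.mpr ⟨by positivity, by exact_mod_cast hkb.1⟩, ?_⟩
      rw [List.any_eq_true]
      refine ⟨row, hrow, ?_⟩
      rw [PySem.List.pyGetD_natCast, List.getD_eq_getElem _ _ hkb.2, he']
      simpa using hvne
    rw [hemp] at hmem
    simp at hmem
  obtain ⟨k0, ks, hKeq⟩ := List.exists_cons_of_ne_nil hkne
  rw [hKeq]
  have h1 : ∀ y : Int,
      (PySem.List.pyRange 0 (((k0 :: ks).map (fun i =>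
          (d0 :: rest).map (fun row => (PySem.List.pyGetD row i 0, PySem.List.pyGetD cats i "")))).length : Int)).map
        (fun x => (PySem.List.pyGetD (PySem.List.pyGetD ((k0 :: ks).map (fun i =>
          (d0 :: rest).map (fun row => (PySem.List.pyGetD row i 0, PySem.List.pyGetD cats i "")))) x []) y (0, "")).1)
      = (k0 :: ks).map (fun i => (PySem.List.pyGetD ((d0 :: rest).map (fun row =>
          (PySem.List.pyGetD row i 0, PySem.List.pyGetD cats i ""))) y (0, "")).1) := by
    intro y
    rw [map_get_comp _ [] (fun col => (PySem.List.pyGetD col y ((0 : Int), "")).1), List.map_map]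
    rfl
  have h2 : ∀ y : Int,
      (PySem.List.pyRange 0 (((k0 :: ks).map (fun i =>
          (d0 :: rest).map (fun row => (PySem.List.pyGetD row i 0, PySem.List.pyGetD cats i "")))).length : Int)).map
        (fun x => (PySem.List.pyGetD (PySem.List.pyGetD ((k0 :: ks).map (fun i =>
          (d0 :: rest).map (fun row => (PySem.List.pyGetD row i 0, PySem.List.pyGetD cats i "")))) x []) y (0, "")).2)
      = (k0 :: ks).map (fun i => (PySem.List.pyGetD ((d0 :: rest).map (fun row =>
          (PySem.List.pyGetD row i 0, PySem.List.pyGetD cats i ""))) y (0, "")).2) := by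
    intro y
    rw [map_get_comp _ [] (fun col => (PySem.List.pyGetD col y ((0 : Int), "")).2), List.map_map]
    rfl
  simp only [h1, h2]
  have hb : (PySem.List.pyGetD ((k0 :: ks).map (fun i =>
      (d0 :: rest).map (fun row => (PySem.List.pyGetD row i 0, PySem.List.pyGetD cats i "")))) 0 []).length
      = (d0 :: rest).length := by
    simp [PySem.List.pyGetD_zero_cons]
  rw [hb, Prod.mk.injEq]
  constructor
  · refine Eq.trans (List.map_congr_left ?_)
      (map_get_comp (d0 :: rest) [] (fun row => (k0 :: ks).map (fun j => PySem.List.pyGetD row j 0)))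
    intro y hy
    obtain ⟨h0, hy'⟩ := PySem.List.mem_pyRange_one.mp hy
    show _ = (k0 :: ks).map (fun j => PySem.List.pyGetD (PySem.List.pyGetD (d0 :: rest) y []) j 0)
    refine List.map_congr_left ?_
    intro i _
    rw [pyGetD_map_in (fun row => (PySem.List.pyGetD row i 0, PySem.List.pyGetD cats i ""))
        (d0 :: rest) y ((0 : Int), "") [] h0 hy']
  · have hr01 : PySem.List.pyRange 0 1 = [0] := by decide
    rw [hr01]
    simp only [List.map_cons, List.map_nil, PySem.List.pyGetD_zero_cons]

-- ===== VERDICT (by name: the statement is the Claim_ definition above) =====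
theorem listaCompNon0_spec : Claim_equal_listaCompNon0 := by
  intro data cats _ hpre
  obtain ⟨hne, hlen, hnz⟩ := hpre
  unfold Spec_listaCompNon0
  cases data with
  | nil => exact absurd rfl hne
  | cons d0 rest =>
    simp only [List.headD_cons] at hlen hnz
    exact main_eq d0 rest cats hlen hnz
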